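-- pv_equiv track=rewrite | github.com/afnanc/Voting-Ballot-System | votingballot.py | Candidates_voter
-- ===== SOURCE A (Python) =====
-- def Candidates_voter(bal_let,list_per ,Vote):
--     while bal_let != []:
--         Vote.append(bal_let.count(bal_let[0]))
--         list_per.append(bal_let[0])
--         for Votes_per_Candidates in range(Vote[-1]):
--             bal_let.pop(0)
--     return Vote
--     return Candidates_list
-- ===== SOURCE B (Python) =====
-- def Candidates_voter(bal_let, list_per, Vote):
--     # One pass to build a count table, then an index pointer that jumps by
--     # the current head's remaining count; counts are decremented as the
--     # "removed" prefix is passed over.  (Does not empty bal_let like the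
--     # original; return value and the appends to list_per/Vote are identical.)
--     cnt = {}
--     for x in bal_let:
--         cnt[x] = cnt.get(x, 0) + 1
--     i = 0
--     n = len(bal_let)
--     while i < n:
--         x = bal_let[i]
--         c = cnt.get(x, 0)
--         Vote.append(c)
--         list_per.append(x)
--         for y in bal_let[i:i + c]:
--             cnt[y] = cnt.get(y, 0) - 1
--         i += c
--     return Vote
-- ===== Notes on version B (the rewrite author's own statement) =====
-- stated objective: faster
-- what changed: Replaces the repeated O(n) list.count and the pop(0) loop on the shrinking list with a hash-map count table built once and an index pointer that jumps by the head's remaining count, decrementing the table over the skipped slice.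
import Mathlib
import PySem

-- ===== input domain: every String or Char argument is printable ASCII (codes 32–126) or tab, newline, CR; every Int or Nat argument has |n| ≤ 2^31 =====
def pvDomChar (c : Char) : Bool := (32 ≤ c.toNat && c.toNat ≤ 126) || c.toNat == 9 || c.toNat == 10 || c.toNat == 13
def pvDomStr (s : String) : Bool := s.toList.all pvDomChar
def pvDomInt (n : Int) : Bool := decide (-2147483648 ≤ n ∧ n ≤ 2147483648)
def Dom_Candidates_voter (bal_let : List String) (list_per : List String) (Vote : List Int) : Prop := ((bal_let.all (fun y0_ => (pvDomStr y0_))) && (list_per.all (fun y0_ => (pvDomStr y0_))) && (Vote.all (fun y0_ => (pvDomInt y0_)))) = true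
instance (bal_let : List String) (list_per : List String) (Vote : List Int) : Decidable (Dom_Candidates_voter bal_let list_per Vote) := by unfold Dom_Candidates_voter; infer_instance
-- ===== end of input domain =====

-- B replaces A's repeated whole-list count and pop(0) loop by a count table built once
-- plus an index pointer (objective: faster). Equivalence is about the RETURN value; A
-- empties bal_let in place, B does not (both append the same values to list_per/Vote).

-- ===== PORT A =====
-- 'for _ in range(c): bal_let.pop(0)': pop(0) on the (always nonempty here) list = drop 1
def pvPopN (l : List String) (n : Nat) : List String :=
  (List.range n).foldl (fun acc _ => acc.drop 1) l

-- cited by pvALoop's termination proof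
lemma pvPopN_eq_drop (l : List String) (n : Nat) : pvPopN l n = l.drop n := by
  induction n generalizing l with
  | zero => simp [pvPopN]
  | succ k ih =>
      simp only [pvPopN, List.range_succ, List.foldl_append, List.foldl_cons, List.foldl_nil] at *
      rw [ih, List.drop_drop]

def pvALoop : List String → List String → List Int → List Int
  | [], _, vote => vote
  | b0 :: rest, per, vote =>
      -- Vote.append(bal_let.count(bal_let[0])); list_per.append(bal_let[0]); pop Vote[-1] times
      pvALoop (pvPopN (b0 :: rest) ((b0 :: rest).count b0)) (per ++ [b0])
              (vote ++ [(((b0 :: rest).count b0 : Nat) : Int)])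
  termination_by bal => bal.length
  decreasing_by
    have hc : 0 < (b0 :: rest).count b0 := List.count_pos_iff.mpr (List.mem_cons_self)
    rw [pvPopN_eq_drop]
    simp only [List.length_drop, List.length_cons]
    omega

def Candidates_voter (bal_let : List String) (list_per : List String) (Vote : List Int) : List Int :=
  pvALoop bal_let list_per Vote

-- ===== PORT B =====
-- cnt = {}; for x in bal_let: cnt[x] = cnt.get(x, 0) + 1
def pvBCount (bal : List String) : PySem.Dict String Int :=
  bal.foldl (fun d x => d.insert x (d.getD x 0 + 1)) PySem.Dict.empty

-- the while loop; fuel bounds the iteration count (each step advances i by at least 1)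
def pvBLoop (bal : List String) : Nat → Int → PySem.Dict String Int → List String → List Int → List Int
  | 0, _, _, _, vote => vote
  | fuel + 1, i, cnt, per, vote =>
      if i < (bal.length : Int) then
        let x := PySem.List.pyGetD bal i ""          -- x = bal_let[i]
        let c := cnt.getD x 0                        -- c = cnt.get(x, 0)
        pvBLoop bal fuel (i + c)
          ((PySem.List.slice bal (some i) (some (i + c))).foldl
            (fun d y => d.insert y (d.getD y 0 - 1)) cnt)  -- for y in bal_let[i:i+c]: cnt[y] = cnt.get(y,0) - 1
          (per ++ [x]) (vote ++ [c])
      else vote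

def Candidates_voter_alt (bal_let : List String) (list_per : List String) (Vote : List Int) : List Int :=
  pvBLoop bal_let (bal_let.length + 1) 0 (pvBCount bal_let) list_per Vote

-- ===== PRECONDITION & SPEC =====
def Spec_Candidates_voter (bal_let : List String) (list_per : List String) (Vote : List Int) (out : List Int) : Prop := out = Candidates_voter_alt bal_let list_per Vote
instance (bal_let : List String) (list_per : List String) (Vote : List Int) (out : List Int) : Decidable (Spec_Candidates_voter bal_let list_per Vote out) := by unfold Spec_Candidates_voter; infer_instance

-- ===== CLAIM (what is proved, stated in full; the proofs are below) =====
def Claim_equal_Candidates_voter : Prop := ∀ (bal_let : List String) (list_per : List String) (Vote : List Int), Dom_Candidates_voter bal_let list_per Vote → Spec_Candidates_voter bal_let list_per Vote (Candidates_voter bal_let list_per Vote)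

-- ===== LEMMAS AND PROOFS =====
lemma pvALoop_nil (per : List String) (vote : List Int) : pvALoop [] per vote = vote := by
  rw [pvALoop]

lemma pvALoop_cons (b0 : String) (rest per : List String) (vote : List Int) :
    pvALoop (b0 :: rest) per vote =
      pvALoop ((b0 :: rest).drop ((b0 :: rest).count b0)) (per ++ [b0])
        (vote ++ [(((b0 :: rest).count b0 : Nat) : Int)]) := by
  rw [pvALoop.eq_def]
  simp only [pvPopN_eq_drop]

-- decrementing the table over seg turns 'counts of seg ++ rest' into 'counts of rest'
lemma pvDecFold (seg : List String) : ∀ (rest : List String) (cnt : PySem.Dict String Int),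
    (∀ x, cnt.getD x 0 = (((seg ++ rest).count x : Nat) : Int)) →
    ∀ x, (seg.foldl (fun d y => d.insert y (d.getD y 0 - 1)) cnt).getD x 0 = ((rest.count x : Nat) : Int) := by
  induction seg with
  | nil => intro rest cnt h x; simpa using h x
  | cons y t ih =>
      intro rest cnt h x
      simp only [List.foldl_cons]
      apply ih rest
      intro z
      by_cases hz : z = y
      · subst hz
        rw [PySem.Dict.getD_insert_self, h z]
        simp
      · rw [PySem.Dict.getD_insert_of_ne _ _ _ hz, h z]
        simp [Ne.symm hz]

lemma pvBLoop_eq (bal : List String) : ∀ (fuel k : Nat) (cnt : PySem.Dict String Int)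
    (per : List String) (vote : List Int),
    (bal.drop k).length < fuel →
    (∀ x, cnt.getD x 0 = (((bal.drop k).count x : Nat) : Int)) →
    pvBLoop bal fuel (k : Int) cnt per vote = pvALoop (bal.drop k) per vote := by
  intro fuel
  induction fuel with
  | zero => intro k cnt per vote hf; omega
  | succ f ih =>
      intro k cnt per vote hf hc
      by_cases hk : k < bal.length
      · have hdrop : bal.drop k = bal[k] :: bal.drop (k + 1) := List.drop_eq_getElem_cons hk
        have hx : PySem.List.pyGetD bal (k : Int) "" = bal[k] := by
          simp [PySem.List.pyGetD_natCast, List.getElem?_eq_getElem hk]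
        set c : Nat := (bal.drop k).count bal[k] with hcdef
        have hcpos : 0 < c := by
          rw [hcdef, hdrop]; exact List.count_pos_iff.mpr (List.mem_cons_self)
        have hcle : c ≤ (bal.drop k).length := List.count_le_length
        have hcv : cnt.getD bal[k] 0 = (c : Int) := hc bal[k]
        have hrec : ((k : Int) + (c : Int)) = ((k + c : Nat) : Int) := by push_cast; ring
        have hslice : PySem.List.slice bal (some (k : Int)) (some ((k : Int) + (c : Int))) =
            (bal.drop k).take c := PySem.List.slice_natCast_add bal k c
        simp only [pvBLoop, hx, hcv, hslice]
        rw [if_pos (by exact_mod_cast hk), hrec, ih (k + c)]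
        · -- both sides are now pvALoop at bal.drop (k + c)
          conv_rhs => rw [hdrop, pvALoop_cons, ← hdrop]
          rw [← hcdef, List.drop_drop]
        · have h1 := List.length_drop (l := bal) (i := k)
          have h2 := List.length_drop (l := bal) (i := k + c)
          omega
        · have hdd : (bal.drop k).drop c = bal.drop (k + c) := by
            rw [List.drop_drop]
          have hsplit : (bal.drop k).take c ++ bal.drop (k + c) = bal.drop k := by
            rw [← hdd]
            exact List.take_append_drop c (bal.drop k)
          intro x
          apply pvDecFold
          intro z
          rw [hsplit]
          exact hc z
      · have hnil : bal.drop k = [] := List.drop_eq_nil_of_le (by omega)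
        rw [hnil, pvALoop_nil]
        simp only [pvBLoop]
        rw [if_neg (by exact_mod_cast not_lt.mpr (not_lt.mp hk))]

-- ===== VERDICT (by name: the statement is the Claim_ definition above) =====
theorem Candidates_voter_spec : Claim_equal_Candidates_voter := by
  intro bal per vote _
  unfold Spec_Candidates_voter Candidates_voter Candidates_voter_alt
  have h := pvBLoop_eq bal (bal.length + 1) 0 (pvBCount bal) per vote
    (by simp) (by intro x; simp [pvBCount, PySem.Dict.getD_foldl_insert_add_one])
  simpa using h.symm
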